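-- pv_equiv track=rewrite | github.com/vslipchenko/archive | tobot/functions/main.py | createTimeoutCommand
-- ===== SOURCE A (Python) =====
-- def createTimeoutCommand(timeoutS, commandToExecute):
--     maxTimeoutPerOnceS = 99999
--     command = ''
--
--     while timeoutS > maxTimeoutPerOnceS:
--         if len(command): command += ' & '
--         command += 'timeout /t {} /nobreak'.format(maxTimeoutPerOnceS)
--         timeoutS -= maxTimeoutPerOnceS
--
--     if timeoutS:
--         if len(command): command += ' & '
--         command += 'timeout /t {} /nobreak'.format(timeoutS)
--
--     command += ' & {} & exit'.format(commandToExecute)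
--     return command
-- ===== SOURCE B (Python) =====
-- def createTimeoutCommand(timeoutS, commandToExecute):
--     maxTimeoutPerOnceS = 99999
--     if timeoutS > maxTimeoutPerOnceS:
--         full, rem = divmod(timeoutS, maxTimeoutPerOnceS)
--         if rem == 0:
--             full -= 1
--             rem = maxTimeoutPerOnceS
--         clauses = ['timeout /t {} /nobreak'.format(maxTimeoutPerOnceS)] * full \
--                   + ['timeout /t {} /nobreak'.format(rem)]
--     elif timeoutS:
--         clauses = ['timeout /t {} /nobreak'.format(timeoutS)]
--     else:
--         clauses = []
--     return ' & '.join(clauses) + ' & {} & exit'.format(commandToExecute)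
-- ===== Notes on version B (the rewrite author's own statement) =====
-- stated objective: alternative
-- what changed: Replaces A's subtraction while-loop and incremental string accumulation with a closed-form divmod computing the chunk count, a list of clause strings built by list-repetition, and a single ' & '.join.
import Mathlib
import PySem

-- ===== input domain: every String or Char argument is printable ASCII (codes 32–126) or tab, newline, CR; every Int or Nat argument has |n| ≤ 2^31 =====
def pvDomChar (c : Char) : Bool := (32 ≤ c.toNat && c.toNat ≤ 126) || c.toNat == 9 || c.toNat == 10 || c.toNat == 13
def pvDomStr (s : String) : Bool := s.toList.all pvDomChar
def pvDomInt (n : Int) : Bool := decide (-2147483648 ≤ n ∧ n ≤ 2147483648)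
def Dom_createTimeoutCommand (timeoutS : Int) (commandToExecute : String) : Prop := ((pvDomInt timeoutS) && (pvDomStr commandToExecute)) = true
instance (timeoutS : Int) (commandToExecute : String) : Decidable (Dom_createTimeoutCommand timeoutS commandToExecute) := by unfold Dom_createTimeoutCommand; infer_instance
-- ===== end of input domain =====

-- B replaces A's subtraction while-loop with a closed-form divmod chunk count, a clause list and one join (alternative decomposition; no speed claim).

-- 'timeout /t {} /nobreak'.format(n), used by both Pythons
def fmtClause (n : Int) : String := "timeout /t " ++ PySem.Int.toStr n ++ " /nobreak"

-- ===== PORT A =====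
-- the while-loop of A: state (timeoutS, command); one pass while timeoutS > 99999
def createTimeoutCommandLoop (timeoutS : Int) (command : String) : Int × String :=
  if 99999 < timeoutS then
    createTimeoutCommandLoop (timeoutS - 99999)
      ((if PySem.Str.len command ≠ 0 then command ++ " & " else command) ++ fmtClause 99999)
  else (timeoutS, command)
termination_by timeoutS.toNat
decreasing_by omega

def createTimeoutCommand (timeoutS : Int) (commandToExecute : String) : String :=
  let p := createTimeoutCommandLoop timeoutS ""
  let command :=
    if p.1 ≠ 0 then
      (if PySem.Str.len p.2 ≠ 0 then p.2 ++ " & " else p.2) ++ fmtClause p.1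
    else p.2
  command ++ (" & " ++ commandToExecute ++ " & exit")

-- ===== PORT B =====
-- divmod(timeoutS, 99999); if rem == 0: full -= 1; rem = M — transliterated as the two clause-list branches
def createTimeoutCommand_alt (timeoutS : Int) (commandToExecute : String) : String :=
  let M : Int := 99999
  let clauses : List String :=
    if M < timeoutS then
      if PySem.Int.mod timeoutS M = 0 then
        List.replicate (PySem.Int.floordiv timeoutS M - 1).toNat (fmtClause M) ++ [fmtClause M]
      else
        List.replicate (PySem.Int.floordiv timeoutS M).toNat (fmtClause M) ++ [fmtClause (PySem.Int.mod timeoutS M)]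
    else if timeoutS ≠ 0 then [fmtClause timeoutS]
    else []
  PySem.Str.join " & " clauses ++ (" & " ++ commandToExecute ++ " & exit")

-- ===== PRECONDITION & SPEC =====
def Spec_createTimeoutCommand (timeoutS : Int) (commandToExecute : String) (out : String) : Prop := out = createTimeoutCommand_alt timeoutS commandToExecute
instance (timeoutS : Int) (commandToExecute : String) (out : String) : Decidable (Spec_createTimeoutCommand timeoutS commandToExecute out) := by unfold Spec_createTimeoutCommand; infer_instance

-- ===== CLAIM (what is proved, stated in full; the proofs are below) =====
def Claim_equal_createTimeoutCommand : Prop := ∀ (timeoutS : Int) (commandToExecute : String), Dom_createTimeoutCommand timeoutS commandToExecute → Spec_createTimeoutCommand timeoutS commandToExecute (createTimeoutCommand timeoutS commandToExecute)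

-- ===== LEMMAS AND PROOFS =====

-- B's clause list as a standalone function (definitionally B's `clauses` block)
def pvClauses (t : Int) : List String :=
  if (99999 : Int) < t then
    if PySem.Int.mod t 99999 = 0 then
      List.replicate (PySem.Int.floordiv t 99999 - 1).toNat (fmtClause 99999) ++ [fmtClause 99999]
    else
      List.replicate (PySem.Int.floordiv t 99999).toNat (fmtClause 99999) ++ [fmtClause (PySem.Int.mod t 99999)]
  else if t ≠ 0 then [fmtClause t]
  else []

theorem alt_eq_clauses (t : Int) (c : String) :
    createTimeoutCommand_alt t c = PySem.Str.join " & " (pvClauses t) ++ (" & " ++ c ++ " & exit") := rfl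

-- the post-loop `if timeoutS:` step of A
def pvFinish (p : Int × String) : String :=
  if p.1 ≠ 0 then
    (if PySem.Str.len p.2 ≠ 0 then p.2 ++ " & " else p.2) ++ fmtClause p.1
  else p.2

-- append a (possibly empty) joined tail to a (possibly empty) accumulator, A's separator rule
def pvApp (c s : String) : String :=
  if s = "" then c else (if c ≠ "" then c ++ " & " else c) ++ s

theorem ne_empty_iff_toList (s : String) : s ≠ "" ↔ s.toList ≠ [] := by
  constructor
  · intro h hl; exact h (String.toList_inj.mp (by simpa using hl))
  · intro h he; subst he; simp at h

theorem clause_ne_empty (n : Int) : fmtClause n ≠ "" := by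
  rw [ne_empty_iff_toList]; simp [fmtClause]

theorem len_ne_zero_eq (s : String) : (PySem.Str.len s ≠ 0) = (s ≠ "") := by
  apply propext
  rw [PySem.Str.len_eq, ne_empty_iff_toList s]
  rcases s.toList with _ | _ <;> simp
  omega

theorem join_singleton (x : String) : PySem.Str.join " & " [x] = x := by
  apply String.toList_inj.mp
  rw [PySem.Str.toList_join]
  simp [PySem.Chars.join_singleton]

theorem join_nil : PySem.Str.join " & " ([] : List String) = "" := by
  apply String.toList_inj.mp
  rw [PySem.Str.toList_join]
  simp [PySem.Chars.join_nil]

theorem join_cons_ne_nil (x : String) (l : List String) (h : l ≠ []) :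
    PySem.Str.join " & " (x :: l) = x ++ " & " ++ PySem.Str.join " & " l := by
  apply String.toList_inj.mp
  obtain ⟨y, l', rfl⟩ := List.exists_cons_of_ne_nil h
  rw [PySem.Str.toList_join]
  simp [PySem.Chars.join_cons_cons, PySem.Str.toList_join]

theorem join_append_clause_ne (l : List String) (n : Int) :
    PySem.Str.join " & " (l ++ [fmtClause n]) ≠ "" := by
  rcases l with _ | ⟨a, l'⟩
  · simpa [join_singleton] using clause_ne_empty n
  · rw [List.cons_append, join_cons_ne_nil _ _ (by simp), ne_empty_iff_toList]
    simp

theorem clauses_ne_nil (t : Int) (h : t ≠ 0) : pvClauses t ≠ [] := by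
  unfold pvClauses
  split
  · split <;> simp
  · simp

theorem join_clauses_ne_empty (t : Int) (h : t ≠ 0) :
    PySem.Str.join " & " (pvClauses t) ≠ "" := by
  unfold pvClauses
  split
  · split <;> exact join_append_clause_ne _ _
  · simpa [join_singleton] using clause_ne_empty t

-- closed-form chunk recurrence: one more 99999-chunk for each extra 99999 seconds
theorem clauses_step (t : Int) (ht : 99999 < t) :
    pvClauses t = fmtClause 99999 :: pvClauses (t - 99999) := by
  have hpos : (0:Int) < 99999 := by norm_num
  have hfd : PySem.Int.floordiv t 99999 = t / 99999 := PySem.Int.floordiv_eq_ediv_of_pos hpos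
  have hfd' : PySem.Int.floordiv (t - 99999) 99999 = (t - 99999) / 99999 := PySem.Int.floordiv_eq_ediv_of_pos hpos
  have hmd : PySem.Int.mod t 99999 = t % 99999 := PySem.Int.mod_eq_emod_of_pos hpos
  have hmd' : PySem.Int.mod (t - 99999) 99999 = (t - 99999) % 99999 := PySem.Int.mod_eq_emod_of_pos hpos
  unfold pvClauses
  rw [if_pos ht, hfd, hmd]
  by_cases h2 : 99999 < t - 99999
  · rw [if_pos h2, hfd', hmd']
    have hmod : t % 99999 = (t - 99999) % 99999 := by omega
    rw [hmod]
    by_cases hz : (t - 99999) % 99999 = 0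
    · rw [if_pos hz, if_pos hz]
      have hdiv : (t / 99999 - 1).toNat = ((t - 99999) / 99999 - 1).toNat + 1 := by omega
      rw [hdiv, List.replicate_succ, List.cons_append]
    · rw [if_neg hz, if_neg hz]
      have hdiv : (t / 99999).toNat = ((t - 99999) / 99999).toNat + 1 := by omega
      rw [hdiv, List.replicate_succ, List.cons_append]
  · rw [if_neg h2, if_pos (by omega : t - 99999 ≠ 0)]
    by_cases hz : t % 99999 = 0
    · rw [if_pos hz]
      have h1 : (t / 99999 - 1).toNat = 1 := by omega
      have h2' : t - 99999 = 99999 := by omega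
      rw [h1, h2', List.replicate_succ, List.replicate_zero, List.cons_append, List.nil_append]
    · rw [if_neg hz]
      have h1 : (t / 99999).toNat = 1 := by omega
      have h2' : t % 99999 = t - 99999 := by omega
      rw [h1, h2', List.replicate_succ, List.replicate_zero, List.cons_append, List.nil_append]

-- main invariant: finishing the loop started from accumulator c yields c with B's joined clause tail
theorem loop_finish (t : Int) (c : String) :
    pvFinish (createTimeoutCommandLoop t c) = pvApp c (PySem.Str.join " & " (pvClauses t)) := by
  by_cases ht : 99999 < t
  · rw [createTimeoutCommandLoop, if_pos ht,
      loop_finish (t - 99999) ((if PySem.Str.len c ≠ 0 then c ++ " & " else c) ++ fmtClause 99999)]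
    have hnil : pvClauses (t - 99999) ≠ [] := clauses_ne_nil _ (by omega)
    have hjn : PySem.Str.join " & " (pvClauses (t - 99999)) ≠ "" := join_clauses_ne_empty _ (by omega)
    have hne2 : fmtClause 99999 ++ " & " ++ PySem.Str.join " & " (pvClauses (t - 99999)) ≠ "" := by
      rw [ne_empty_iff_toList]; simp [fmtClause]
    have hacc : (if c ≠ "" then c ++ " & " else c) ++ fmtClause 99999 ≠ "" := by
      rw [ne_empty_iff_toList]; simp [fmtClause]
    rw [clauses_step t ht, join_cons_ne_nil _ _ hnil]
    simp only [len_ne_zero_eq]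
    unfold pvApp
    rw [if_neg hjn, if_neg hne2, if_pos hacc]
    apply String.toList_inj.mp
    by_cases hc : c = "" <;> simp [hc, fmtClause]
  · rw [createTimeoutCommandLoop, if_neg ht]
    unfold pvFinish pvClauses pvApp
    rw [if_neg ht]
    simp only [len_ne_zero_eq]
    by_cases h0 : t ≠ 0
    · rw [if_pos h0, if_pos h0, join_singleton, if_neg (clause_ne_empty t)]
    · rw [if_neg h0, if_neg h0, join_nil, if_pos rfl]
termination_by t.toNat
decreasing_by omega

-- ===== VERDICT (by name: the statement is the Claim_ definition above) =====
theorem createTimeoutCommand_spec : Claim_equal_createTimeoutCommand := by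
  intro t c _
  unfold Spec_createTimeoutCommand
  rw [alt_eq_clauses]
  show (pvFinish (createTimeoutCommandLoop t "")) ++ (" & " ++ c ++ " & exit") = _
  rw [loop_finish]
  unfold pvApp
  split
  · rename_i h
    rw [h]
  · apply String.toList_inj.mp
    simp
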